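-- pv_equiv track=rewrite | github.com/williamwang4102000/EGFRProject | egfr_dist_analysis/dist_analy-master/dist_analy/determine_seq.py | def_union
-- ===== SOURCE A (Python) =====
-- def def_union(s1,s2):
--     """Given two lists of numbers return the union of the two list
--
--     Parameters
--     ----------
--     s1 : list
--         first list
--     s2 : list
--         second list
--
--     Returns
--     -------
--     list, list
--         sorted list of numbers representing the union of the two sets
--         list of numbers reflecting the corresponding index of the union and
--         whether the number came from the list 1 (1), list 2 (2) or both (0)
--
--     """
--     # returns two arrays 1) union of two sets and 2) array where each index reflects which set
--     # the index came from. 0 from both, 1 from s1, 2 from s2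
--     union=sorted(set(s1).union(set(s2)))
--     union_ind = []
--     for x in union:
--         if x in s1 and x in s2:
--             union_ind.append(0)
--         elif x in s1:
--             union_ind.append(1)
--         elif x in s2:
--             union_ind.append(2)
--     return(union, union_ind)
-- ===== SOURCE B (Python) =====
-- def def_union(s1, s2):
--     lab = {}
--     for x in s1:
--         lab[x] = 1
--     for x in s2:
--         lab[x] = 2 if lab.get(x, 2) == 2 else 0
--     union = sorted(lab)
--     return (union, [lab[k] for k in union])
-- ===== Notes on version B (the rewrite author's own statement) =====
-- stated objective: faster
-- what changed: Replaces A's 'sort the set union, then linearly membership-scan both input lists for every union element' with two forward passes building a value-to-label dict (s1 writes 1, s2 promotes to 0 or adds 2), then one sorted emission over the dict keys; the inner O(n) membership scans disappear.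
import Mathlib
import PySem

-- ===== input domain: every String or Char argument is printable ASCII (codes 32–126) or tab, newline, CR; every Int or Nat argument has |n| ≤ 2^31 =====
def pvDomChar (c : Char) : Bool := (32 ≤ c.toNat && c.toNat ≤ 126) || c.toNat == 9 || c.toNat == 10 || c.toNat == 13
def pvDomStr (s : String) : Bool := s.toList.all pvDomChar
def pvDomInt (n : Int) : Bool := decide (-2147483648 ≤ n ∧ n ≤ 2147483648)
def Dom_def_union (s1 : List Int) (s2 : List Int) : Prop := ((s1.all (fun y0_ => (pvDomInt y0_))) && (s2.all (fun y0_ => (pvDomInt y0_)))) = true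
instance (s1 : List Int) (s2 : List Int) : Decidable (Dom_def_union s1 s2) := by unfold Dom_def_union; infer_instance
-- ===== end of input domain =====

-- B builds a value→label dict in two forward passes and emits it sorted, instead of
-- A's membership scan of both lists for every element of the sorted set union (asymptotically faster; measured so in a timing run).

-- ===== PORT A =====
def def_union (s1 : List Int) (s2 : List Int) : List Int × List Int :=
  let union := PySem.List.sorted (PySem.Set.union (PySem.Set.ofList s1) (PySem.Set.ofList s2)) (fun x => x) false
  let union_ind := union.foldl (fun acc x =>
    if x ∈ s1 ∧ x ∈ s2 then acc ++ [(0 : Int)]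
    else if x ∈ s1 then acc ++ [(1 : Int)]
    else if x ∈ s2 then acc ++ [(2 : Int)]
    else acc) []
  (union, union_ind)

-- ===== PORT B =====
-- the first loop of Source B: 'for x in s1: lab[x] = 1'
def pvPass1 (d : PySem.Dict Int Int) (s1 : List Int) : PySem.Dict Int Int :=
  s1.foldl (fun d x => d.insert x 1) d
-- the second loop of Source B: 'for x in s2: lab[x] = 2 if lab.get(x, 2) == 2 else 0'
def pvPass2 (d : PySem.Dict Int Int) (s2 : List Int) : PySem.Dict Int Int :=
  s2.foldl (fun d x => d.insert x (if d.getD x 2 == 2 then 2 else 0)) d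

def def_union_alt (s1 : List Int) (s2 : List Int) : List Int × List Int :=
  let lab := pvPass2 (pvPass1 PySem.Dict.empty s1) s2
  let union := PySem.List.sorted lab.keys (fun x => x) false
  (union, union.map (fun k => lab.getD k 0))

-- ===== PRECONDITION & SPEC =====
def Spec_def_union (s1 : List Int) (s2 : List Int) (out : List Int × List Int) : Prop := out = def_union_alt s1 s2
instance (s1 : List Int) (s2 : List Int) (out : List Int × List Int) : Decidable (Spec_def_union s1 s2 out) := by unfold Spec_def_union; infer_instance

-- ===== CLAIM (what is proved, stated in full; the proofs are below) =====
def Claim_equal_def_union : Prop := ∀ (s1 : List Int) (s2 : List Int), Dom_def_union s1 s2 → Spec_def_union s1 s2 (def_union s1 s2)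

-- ===== LEMMAS AND PROOFS =====

-- the label A's scan assigns to a union element
def pvLabel (s1 s2 : List Int) (x : Int) : Int :=
  if x ∈ s1 ∧ x ∈ s2 then 0 else if x ∈ s1 then 1 else 2

-- A's conditional-append loop is a map, since every union element is in s1 or s2
lemma foldl_label (s1 s2 : List Int) (l : List Int) (acc : List Int)
    (h : ∀ x ∈ l, x ∈ s1 ∨ x ∈ s2) :
    l.foldl (fun acc x =>
      if x ∈ s1 ∧ x ∈ s2 then acc ++ [(0 : Int)]
      else if x ∈ s1 then acc ++ [(1 : Int)]
      else if x ∈ s2 then acc ++ [(2 : Int)]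
      else acc) acc = acc ++ l.map (pvLabel s1 s2) := by
  induction l generalizing acc with
  | nil => simp
  | cons y t ih =>
    have hy := h y (by simp)
    simp only [List.foldl_cons, List.map_cons]
    rw [ih _ (fun x hx => h x (by simp [hx]))]
    unfold pvLabel
    by_cases h1 : y ∈ s1 <;> by_cases h2 : y ∈ s2 <;> simp [h1, h2] at hy ⊢

-- first pass: lookup in the dict built from s1
lemma pass1_get? (s1 : List Int) (d : PySem.Dict Int Int) (x : Int) :
    (pvPass1 d s1).get? x = if x ∈ s1 then some 1 else d.get? x := by
  induction s1 generalizing d with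
  | nil => simp [pvPass1]
  | cons y t ih =>
    show (pvPass1 (d.insert y 1) t).get? x = _
    rw [ih]
    by_cases ht : x ∈ t
    · simp [ht]
    · by_cases hyx : x = y
      · subst hyx; simp [ht, PySem.Dict.get?_insert_self]
      · simp [ht, hyx, PySem.Dict.get?_insert_of_ne _ _ hyx]

-- second pass: the promotion loop's final lookup
lemma pass2_get? (s2 : List Int) (d : PySem.Dict Int Int) (x : Int) :
    (pvPass2 d s2).get? x
      = if x ∈ s2 then some (if d.getD x 2 = 2 then 2 else 0) else d.get? x := by
  induction s2 generalizing d with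
  | nil => simp [pvPass2]
  | cons y t ih =>
    show (pvPass2 (d.insert y _) t).get? x = _
    rw [ih]
    by_cases hyx : x = y
    · subst hyx
      by_cases ht : x ∈ t
      · simp only [ht, if_true, List.mem_cons, true_or, if_true]
        rw [PySem.Dict.getD_insert_self]
        by_cases hv : d.getD x 2 = 2 <;> simp [hv]
      · simp [ht, PySem.Dict.get?_insert_self, PySem.Dict.getD_eq_get?_getD]
    · by_cases ht : x ∈ t
      · simp [ht, hyx, PySem.Dict.getD_insert]
      · simp [ht, hyx, PySem.Dict.get?_insert_of_ne _ _ hyx]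

-- B's final dict lookup equals A's label, for x in the union
lemma lab_getD (s1 s2 : List Int) (x : Int) (hx : x ∈ s1 ∨ x ∈ s2) :
    (pvPass2 (pvPass1 PySem.Dict.empty s1) s2).getD x 0 = pvLabel s1 s2 x := by
  rw [PySem.Dict.getD_eq_get?_getD, pass2_get?]
  have h1 : (pvPass1 PySem.Dict.empty s1).getD x 2 = if x ∈ s1 then 1 else 2 := by
    rw [PySem.Dict.getD_eq_get?_getD, pass1_get?]
    by_cases h : x ∈ s1 <;> simp [h, PySem.Dict.get?_empty]
  rw [h1]
  unfold pvLabel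
  by_cases hm1 : x ∈ s1 <;> by_cases hm2 : x ∈ s2 <;>
    simp [hm1, hm2, pass1_get?] at hx ⊢

-- B's key list is a permutation of A's set union
lemma keys_perm (s1 s2 : List Int) :
    ((pvPass2 (pvPass1 PySem.Dict.empty s1) s2).keys).Perm
      (PySem.Set.union (PySem.Set.ofList s1) (PySem.Set.ofList s2)) := by
  have hk1 : (pvPass1 PySem.Dict.empty s1).keys = PySem.Set.ofList s1 := by
    rw [pvPass1, PySem.Dict.keys_foldl_insert]
    simp [PySem.Dict.keys_empty, PySem.Set.update_nil_left]
  have hk : (pvPass2 (pvPass1 PySem.Dict.empty s1) s2).keys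
      = PySem.Set.update (PySem.Set.ofList s1) s2 := by
    rw [pvPass2, PySem.Dict.keys_foldl_insert, hk1]
  rw [hk]
  apply (List.perm_ext_iff_of_nodup ?_ ?_).mpr
  · intro a
    rw [PySem.Set.mem_update, PySem.Set.mem_union]
    simp [PySem.Set.mem_ofList]
  · exact PySem.Set.nodup_update _ _ (PySem.Set.nodup_ofList _)
  · exact PySem.Set.nodup_union _ _ (PySem.Set.nodup_ofList _)

lemma union_eq (s1 s2 : List Int) :
    PySem.List.sorted ((pvPass2 (pvPass1 PySem.Dict.empty s1) s2).keys) (fun x => x) false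
      = PySem.List.sorted (PySem.Set.union (PySem.Set.ofList s1) (PySem.Set.ofList s2)) (fun x => x) false :=
  PySem.List.sorted_eq_sorted_of_perm _ _ _ (fun _ _ h => h) (keys_perm s1 s2)

-- ===== VERDICT (by name: the statement is the Claim_ definition above) =====
theorem def_union_spec : Claim_equal_def_union := by
  intro s1 s2 _
  simp only [Spec_def_union, def_union, def_union_alt]
  rw [union_eq]
  refine Prod.ext rfl ?_
  have hmem : ∀ x ∈ PySem.List.sorted (PySem.Set.union (PySem.Set.ofList s1) (PySem.Set.ofList s2)) (fun x => x) false,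
      x ∈ s1 ∨ x ∈ s2 := by
    intro x hx
    rw [PySem.List.mem_sorted, PySem.Set.mem_union] at hx
    simpa [PySem.Set.mem_ofList] using hx
  rw [foldl_label s1 s2 _ _ hmem]
  simp only [List.nil_append]
  apply List.map_congr_left
  intro x hx
  exact (lab_getD s1 s2 x (hmem x hx)).symm
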